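-- pv_equiv track=rewrite | github.com/ManonDav/jeu_du_moulin | joueur.py | verifier_coord
-- ===== SOURCE A (Python) =====
-- COORD=[(100,20),(400,20),(700,20),
--        (200,100),(400,100),(600,100),
--        (300,180),(400,180),(500,180),
--        (100,250),(200,250),(300,250),(500,250),(600,250),(700,250),
--        (300,320),(400,320),(500,320),
--        (200,400),(400,400),(600,400),
--        (100,480),(400,480),(700,480)]
--
-- def verifier_coord(souris_pos,l_ordi,l_joueur):
--     """
--         (int,int), liste(dico_pion), liste(dico_pion) => Bool
--         Trouve les vraies coordonnées de souris_pos puis vérifie qu'elle ne sont pas déjà occupé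
--     """
--     x=souris_pos[0]
--     y=souris_pos[1]
--     vrai_COORD=0
--     for i in range(len(COORD)):
--         x_ok=False
--         y_ok=False
--         for j in range(-15,15):
--             if x==COORD[i][0]+j:
--                 x_ok=True
--             if y==COORD[i][1]+j:
--                 y_ok=True
--             if x_ok and y_ok:
--                 vrai_COORD=COORD[i]
--
--     if vrai_COORD!=0:
--         for k in range(len(l_ordi)):
--             if l_ordi[k]["position"]==vrai_COORD:
--                 return False
--         for l in range(len(l_joueur)):
--             if l_joueur[l]["position"]==vrai_COORD:
--                 return False
--         return True
--     else:
--         return False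
-- ===== SOURCE B (Python) =====
-- COORD=[(100,20),(400,20),(700,20),
--        (200,100),(400,100),(600,100),
--        (300,180),(400,180),(500,180),
--        (100,250),(200,250),(300,250),(500,250),(600,250),(700,250),
--        (300,320),(400,320),(500,320),
--        (200,400),(400,400),(600,400),
--        (100,480),(400,480),(700,480)]
--
-- Y_VALS = (20, 100, 180, 250, 320, 400, 480)
--
-- def verifier_coord(souris_pos, l_ordi, l_joueur):
--     x, y = souris_pos
--     # All board x-coordinates are multiples of 100 and the snap window around a
--     # point is [cx-15, cx+14] x [cy-15, cy+14]; windows are disjoint, so the only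
--     # candidate cx is the greatest multiple of 100 not exceeding x+15, computed
--     # directly, and the candidate cy is the unique row whose window contains y.
--     cx = 100 * ((x + 15) // 100)
--     cy = None
--     for v in Y_VALS:
--         if -15 <= y - v <= 14:
--             cy = v
--             break
--     if cy is None or not (-15 <= x - cx <= 14) or (cx, cy) not in COORD:
--         return False
--     for d in l_ordi + l_joueur:
--         if d["position"] == (cx, cy):
--             return False
--     return True
-- ===== Notes on version B (the rewrite author's own statement) =====
-- stated objective: alternative
-- what changed: A's double scan over the 24 board points with a 30-iteration offset loop and flag overwriting is replaced by a direct arithmetic snap: the only candidate x-coordinate is 100*((x+15)//100) (the greatest multiple of 100 not exceeding x+15, since every board x is a multiple of 100 and windows are 30 wide and disjoint), the candidate row is the first of the 7 y-values whose window holds y (unique, windows disjoint), followed by one membership test in COORD and a single occupancy loop over l_ordi + l_joueur in A's order with the same short-circuit.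
-- outside the precondition, e.g. on verifier_coord((100, 20), [{'position': (100, 20)}], [{'x': (0, 0)}]): A returns False, B returns False
import Mathlib
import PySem

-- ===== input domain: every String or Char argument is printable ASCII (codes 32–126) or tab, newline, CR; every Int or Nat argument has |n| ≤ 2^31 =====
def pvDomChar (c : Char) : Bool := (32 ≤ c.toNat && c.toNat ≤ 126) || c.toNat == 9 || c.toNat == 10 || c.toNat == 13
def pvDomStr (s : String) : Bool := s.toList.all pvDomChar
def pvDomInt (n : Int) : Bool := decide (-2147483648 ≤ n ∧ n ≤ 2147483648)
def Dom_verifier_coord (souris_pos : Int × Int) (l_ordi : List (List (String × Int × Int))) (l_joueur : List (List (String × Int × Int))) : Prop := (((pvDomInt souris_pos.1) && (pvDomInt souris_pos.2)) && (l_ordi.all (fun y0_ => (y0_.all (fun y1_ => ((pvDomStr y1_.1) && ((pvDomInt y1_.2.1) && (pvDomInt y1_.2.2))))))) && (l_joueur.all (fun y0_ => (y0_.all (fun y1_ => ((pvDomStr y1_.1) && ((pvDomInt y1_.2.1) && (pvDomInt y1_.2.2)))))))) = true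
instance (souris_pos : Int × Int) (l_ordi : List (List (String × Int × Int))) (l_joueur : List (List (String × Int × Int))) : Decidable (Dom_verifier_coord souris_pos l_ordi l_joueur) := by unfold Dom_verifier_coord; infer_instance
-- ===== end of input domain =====

-- B replaces A's double scan (24 points × 30 offsets with flag overwriting) by a direct
-- arithmetic snap: the candidate x-coordinate is the greatest multiple of 100 not exceeding
-- x+15, the candidate row is the unique y-value whose window holds y, then one membership
-- test in COORD and one occupancy loop over the concatenated piece lists; alternative
-- decomposition, not claimed faster.

-- ===== PORT A =====
def pvCOORD : List (Int × Int) :=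
  [(100,20),(400,20),(700,20),
   (200,100),(400,100),(600,100),
   (300,180),(400,180),(500,180),
   (100,250),(200,250),(300,250),(500,250),(600,250),(700,250),
   (300,320),(400,320),(500,320),
   (200,400),(400,400),(600,400),
   (100,480),(400,480),(700,480)]

def verifier_coord (souris_pos : Int × Int) (l_ordi : List (List (String × Int × Int))) (l_joueur : List (List (String × Int × Int))) : Bool :=
  let x := souris_pos.1
  let y := souris_pos.2
  -- vrai_COORD = 0 sentinel is `none`
  let vrai : Option (Int × Int) :=
    (PySem.List.pyRange 0 (pvCOORD.length : Int) 1).foldl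
      (fun (v : Option (Int × Int)) i =>
        let c := PySem.List.pyGetD pvCOORD i (0, 0)
        let r := (PySem.List.pyRange (-15) 15 1).foldl
          (fun (s : Bool × Bool × Option (Int × Int)) j =>
            let xok := if x == c.1 + j then true else s.1
            let yok := if y == c.2 + j then true else s.2.1
            (xok, yok, if xok && yok then some c else s.2.2))
          (false, false, v)
        r.2.2)
      none
  if vrai ≠ none then
    if l_ordi.any (fun d => (PySem.Dict.mk d).get? "position" == vrai) then false
    else if l_joueur.any (fun d => (PySem.Dict.mk d).get? "position" == vrai) then false
    else true
  else false

-- ===== PORT B =====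
def pvYVals : List Int := [20, 100, 180, 250, 320, 400, 480]

-- B's y-window test `-15 <= y - v <= 14`
def pvYHit (y v : Int) : Bool := decide (-15 ≤ y - v) && decide (y - v ≤ 14)

def verifier_coord_alt (souris_pos : Int × Int) (l_ordi : List (List (String × Int × Int))) (l_joueur : List (List (String × Int × Int))) : Bool :=
  let x := souris_pos.1
  let y := souris_pos.2
  let cx := 100 * PySem.Int.floordiv (x + 15) 100
  -- the for-loop with break over Y_VALS is a first-match find
  match pvYVals.find? (fun v => pvYHit y v) with
  | none => false
  | some cy =>
    if !((decide (-15 ≤ x - cx) && decide (x - cx ≤ 14)) && pvCOORD.contains (cx, cy)) then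
      false
    else if (l_ordi ++ l_joueur).any (fun d => (PySem.Dict.mk d).get? "position" == some (cx, cy)) then
      false
    else true

-- ===== PRECONDITION & SPEC =====
-- window test of A's inner loop, used to state the KeyError-free precondition
def pvHit (x y : Int) (c : Int × Int) : Bool :=
  (decide (-15 ≤ x - c.1) && decide (x - c.1 ≤ 14)) && (decide (-15 ≤ y - c.2) && decide (y - c.2 ≤ 14))

-- Pre_ excludes inputs where a snapped board point exists and some pion dict lacks the key
-- "position": there Python raises KeyError (both A and B raise at the same first such dict);
-- it is slightly wider than the raising set (a dict after an early occupied match is never read),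
-- see the cite in claim.json.
def Pre_verifier_coord (souris_pos : Int × Int) (l_ordi : List (List (String × Int × Int))) (l_joueur : List (List (String × Int × Int))) : Prop :=
  (pvCOORD.any (pvHit souris_pos.1 souris_pos.2)) = true →
    ((l_ordi ++ l_joueur).all (fun d => d.any (fun e => e.1 == "position"))) = true
instance (souris_pos : Int × Int) (l_ordi : List (List (String × Int × Int))) (l_joueur : List (List (String × Int × Int))) : Decidable (Pre_verifier_coord souris_pos l_ordi l_joueur) := by unfold Pre_verifier_coord; infer_instance

def pvWitness_verifier_coord : (Int × Int) × (List (List (String × Int × Int))) × (List (List (String × Int × Int))) :=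
  ((100, 20), [[("position", (100, 20))]], [[("position", (400, 20))]])

def Spec_verifier_coord (souris_pos : Int × Int) (l_ordi : List (List (String × Int × Int))) (l_joueur : List (List (String × Int × Int))) (out : Bool) : Prop := out = verifier_coord_alt souris_pos l_ordi l_joueur
instance (souris_pos : Int × Int) (l_ordi : List (List (String × Int × Int))) (l_joueur : List (List (String × Int × Int))) (out : Bool) : Decidable (Spec_verifier_coord souris_pos l_ordi l_joueur out) := by unfold Spec_verifier_coord; infer_instance

-- ===== CLAIM (what is proved, stated in full; the proofs are below) =====
def Claim_equal_verifier_coord : Prop := ∀ (souris_pos : Int × Int) (l_ordi : List (List (String × Int × Int))) (l_joueur : List (List (String × Int × Int))), Dom_verifier_coord souris_pos l_ordi l_joueur → Pre_verifier_coord souris_pos l_ordi l_joueur → Spec_verifier_coord souris_pos l_ordi l_joueur (verifier_coord souris_pos l_ordi l_joueur)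

-- ===== LEMMAS AND PROOFS =====

-- the 30-step inner loop's `any` equals the direct window test
theorem pv_any_window (x c : Int) :
    ((PySem.List.pyRange (-15) 15 1).any (fun j => x == c + j))
      = (decide (-15 ≤ x - c) && decide (x - c ≤ 14)) := by
  have h : PySem.List.pyRange (-15) 15 1 =
      [-15,-14,-13,-12,-11,-10,-9,-8,-7,-6,-5,-4,-3,-2,-1,0,1,2,3,4,5,6,7,8,9,10,11,12,13,14] := by
    decide
  rw [h]
  rw [Bool.eq_iff_iff]
  simp only [List.any_cons, List.any_nil, Bool.or_eq_true, Bool.and_eq_true,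
    beq_iff_eq, decide_eq_true_eq, Bool.or_false]
  omega

-- closed form of A's inner flag-and-overwrite loop
theorem pv_inner_fold (x y cx cy : Int) (L : List Int) (a b : Bool) (v : Option (Int × Int)) :
    L.foldl
      (fun (s : Bool × Bool × Option (Int × Int)) j =>
        let xok := if x == cx + j then true else s.1
        let yok := if y == cy + j then true else s.2.1
        (xok, yok, if xok && yok then some (cx, cy) else s.2.2)) (a, b, v)
    = ((a || L.any (fun j => x == cx + j)),
       (b || L.any (fun j => y == cy + j)),
       if (a || L.any (fun j => x == cx + j)) && (b || L.any (fun j => y == cy + j)) && !L.isEmpty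
       then some (cx, cy) else v) := by
  induction L generalizing a b v with
  | nil => simp
  | cons j L ih =>
    simp only [List.foldl_cons, List.any_cons, List.isEmpty_cons, ih]
    cases L with
    | nil =>
      by_cases hx : x == cx + j <;> by_cases hy : y == cy + j <;>
        cases a <;> cases b <;> simp [hx, hy]
    | cons k K =>
      by_cases hx : x == cx + j <;> by_cases hy : y == cy + j <;>
        cases a <;> cases b <;>
        simp [hx, hy]

-- last-match overwrite loop = first match of the reversed list
theorem pv_lastmatch (p : (Int × Int) → Bool) (L : List (Int × Int)) (v : Option (Int × Int)) :
    L.foldl (fun (v : Option (Int × Int)) c => if p c then some c else v) v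
      = Option.or (L.reverse.find? p) v := by
  induction L generalizing v with
  | nil => simp
  | cons c L ih =>
    simp only [List.foldl_cons, List.reverse_cons, List.find?_append, ih]
    cases hf : L.reverse.find? p <;> cases hp : p c <;> simp [List.find?, hp, Option.or]

-- find? may replace its predicate by one agreeing on the list's members
theorem pv_find?_congr_mem {α : Type} (p q : α → Bool) (L : List α)
    (h : ∀ a ∈ L, p a = q a) : L.find? p = L.find? q := by
  induction L with
  | nil => rfl
  | cons a L ih =>
    have ha := h a (List.mem_cons_self ..)
    simp only [List.find?_cons, ha]
    cases q a
    · exact ih (fun b hb => h b (List.mem_cons_of_mem _ hb))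
    · rfl

-- find? of a predicate with a unique satisfying member
theorem pv_find?_unique {α : Type} (p : α → Bool) (t : α) (L : List α)
    (hm : t ∈ L) (hp : p t = true) (hu : ∀ c ∈ L, p c = true → c = t) :
    L.find? p = some t := by
  induction L with
  | nil => cases hm
  | cons a L ih =>
    by_cases ha : p a = true
    · have h : a = t := hu a (List.mem_cons_self ..) ha
      subst h
      simp [ha]
    · have hat : t ≠ a := fun h => ha (h ▸ hp)
      have hm' : t ∈ L := by
        rcases List.mem_cons.mp hm with h | h
        · exact absurd h hat
        · exact h
      simp only [List.find?_cons, Bool.eq_false_iff.mpr ha]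
      exact ih hm' (fun c hc => hu c (List.mem_cons_of_mem _ hc))

-- A's window test, characterised arithmetically on board points
theorem pv_hit_char (x y : Int) (c : Int × Int) (hc : c ∈ pvCOORD) :
    pvHit x y c
      = (((100 * PySem.Int.floordiv (x + 15) 100 == c.1) && decide (x - c.1 ≤ 14))
          && pvYHit y c.2) := by
  rw [PySem.Int.floordiv_eq_ediv_of_pos (by omega)]
  fin_cases hc <;>
    · simp only [pvHit, pvYHit]
      rw [Bool.eq_iff_iff]
      simp only [Bool.and_eq_true, decide_eq_true_eq, beq_iff_eq]
      omega

-- at most one row's y-window contains y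
theorem pv_yhit_unique (y : Int) (a b : Int) (ha : a ∈ pvYVals) (hb : b ∈ pvYVals)
    (h1 : pvYHit y a = true) (h2 : pvYHit y b = true) : a = b := by
  fin_cases ha <;> fin_cases hb <;> simp_all [pvYHit] <;> omega

-- every board point's row is one of the seven y-values
theorem pv_snd_mem (c : Int × Int) (hc : c ∈ pvCOORD) : c.2 ∈ pvYVals := by
  fin_cases hc <;> simp [pvYVals]

-- the snap found by A's scan equals B's arithmetic snap
theorem pv_snap_eq (x y : Int) :
    pvCOORD.reverse.find? (pvHit x y)
      = (match pvYVals.find? (fun v => pvYHit y v) with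
         | none => none
         | some cy =>
           if !((decide (-15 ≤ x - (100 * PySem.Int.floordiv (x + 15) 100))
                  && decide (x - (100 * PySem.Int.floordiv (x + 15) 100) ≤ 14))
                && pvCOORD.contains (100 * PySem.Int.floordiv (x + 15) 100, cy)) then none
           else some (100 * PySem.Int.floordiv (x + 15) 100, cy)) := by
  set cx := 100 * PySem.Int.floordiv (x + 15) 100 with hcx
  have hcxe : cx = 100 * ((x + 15) / 100) := by
    rw [hcx, PySem.Int.floordiv_eq_ediv_of_pos (by omega)]
  have hlow : -15 ≤ x - cx := by rw [hcxe]; omega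
  rw [pv_find?_congr_mem (pvHit x y)
      (fun c => ((cx == c.1 && decide (x - c.1 ≤ 14)) && pvYHit y c.2)) _
      (fun c hc => pv_hit_char x y c (List.mem_reverse.mp hc))]
  cases hy : pvYVals.find? (fun v => pvYHit y v) with
  | none =>
    have hnone := List.find?_eq_none.mp hy
    simp only
    apply List.find?_eq_none.mpr
    intro c hc
    have hc' := List.mem_reverse.mp hc
    have h2 := pv_snd_mem c hc'
    simp only [Bool.and_eq_true, beq_iff_eq, decide_eq_true_eq, not_and]
    intro _ h
    exact absurd h (hnone c.2 h2)
  | some cy =>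
    have hhit : pvYHit y cy = true := by
      have := List.find?_some hy; simpa using this
    have hmem : cy ∈ pvYVals := List.mem_of_find?_eq_some hy
    by_cases hcond : ((decide (-15 ≤ x - cx) && decide (x - cx ≤ 14))
        && pvCOORD.contains (cx, cy)) = true
    · simp only [hcond, Bool.not_true, Bool.false_eq_true, reduceIte]
      have hcnd := hcond
      simp only [Bool.and_eq_true, decide_eq_true_eq, List.contains_eq_mem,
        decide_eq_true_eq] at hcnd
      apply pv_find?_unique _ (cx, cy)
      · exact List.mem_reverse.mpr hcnd.2
      · simp [hhit, hcnd.1.2]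
      · intro c hc hpc
        have hc' := List.mem_reverse.mp hc
        simp only [Bool.and_eq_true, beq_iff_eq, decide_eq_true_eq] at hpc
        have h2 : c.2 = cy := pv_yhit_unique y c.2 cy (pv_snd_mem c hc') hmem hpc.2 hhit
        have h1 : c.1 = cx := hpc.1.1.symm
        exact Prod.ext h1 h2
    · simp only [Bool.not_eq_true] at hcond
      simp only [hcond, Bool.not_false, reduceIte]
      apply List.find?_eq_none.mpr
      intro c hc hpc
      have hc' := List.mem_reverse.mp hc
      simp only [Bool.and_eq_true, beq_iff_eq, decide_eq_true_eq] at hpc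
      have h2 : c.2 = cy := pv_yhit_unique y c.2 cy (pv_snd_mem c hc') hmem hpc.2 hhit
      have h1 : c.1 = cx := hpc.1.1.symm
      have : ((decide (-15 ≤ x - cx) && decide (x - cx ≤ 14))
          && pvCOORD.contains (cx, cy)) = true := by
        simp only [Bool.and_eq_true, decide_eq_true_eq, List.contains_eq_mem, decide_eq_true_eq]
        exact ⟨⟨hlow, h1 ▸ hpc.1.2⟩, by rw [← h1, ← h2]; exact hc'⟩
      rw [hcond] at this
      exact Bool.false_ne_true this

-- the sequential occupancy scans of A equal one scan of the concatenation
theorem pv_occup (s : Option (Int × Int)) (l_ordi l_joueur : List (List (String × Int × Int))) :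
    (if s ≠ none then
       if l_ordi.any (fun d => (PySem.Dict.mk d).get? "position" == s) then false
       else if l_joueur.any (fun d => (PySem.Dict.mk d).get? "position" == s) then false
       else true
     else false)
    = match s with
      | none => false
      | some v =>
        if (l_ordi ++ l_joueur).any (fun d => (PySem.Dict.mk d).get? "position" == some v) then false
        else true := by
  cases s with
  | none => simp
  | some v =>
    simp only [ne_eq, reduceCtorEq, not_false_iff, if_true, List.any_append]
    cases h1 : l_ordi.any (fun d => (PySem.Dict.mk d).get? "position" == some v) <;>
    cases h2 : l_joueur.any (fun d => (PySem.Dict.mk d).get? "position" == some v) <;>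
      simp_all

theorem verifier_coord_eq (souris_pos : Int × Int) (l_ordi l_joueur : List (List (String × Int × Int))) :
    verifier_coord souris_pos l_ordi l_joueur = verifier_coord_alt souris_pos l_ordi l_joueur := by
  obtain ⟨x, y⟩ := souris_pos
  unfold verifier_coord verifier_coord_alt
  simp only
  rw [PySem.List.foldl_pyRange_zero_pyGetD' pvCOORD (0,0)
    (fun (v : Option (Int × Int)) (c : Int × Int) =>
      ((PySem.List.pyRange (-15) 15 1).foldl
        (fun (s : Bool × Bool × Option (Int × Int)) j =>
          let xok := if x == c.1 + j then true else s.1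
          let yok := if y == c.2 + j then true else s.2.1
          (xok, yok, if xok && yok then some c else s.2.2)) (false, false, v)).2.2) none]
  have hstep : ∀ (v : Option (Int × Int)) (c : Int × Int),
      ((PySem.List.pyRange (-15) 15 1).foldl
        (fun (s : Bool × Bool × Option (Int × Int)) j =>
          let xok := if x == c.1 + j then true else s.1
          let yok := if y == c.2 + j then true else s.2.1
          (xok, yok, if xok && yok then some c else s.2.2)) (false, false, v)).2.2
      = if pvHit x y c then some c else v := by
    intro v c
    obtain ⟨cx, cy⟩ := c
    rw [pv_inner_fold x y cx cy]
    simp only [Bool.false_or]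
    rw [pv_any_window x cx, pv_any_window y cy]
    have hne : (PySem.List.pyRange (-15) 15 1).isEmpty = false := by decide
    rw [hne]
    simp [pvHit, Bool.and_assoc]
  have hfold : pvCOORD.foldl
      (fun (v : Option (Int × Int)) (c : Int × Int) =>
        ((PySem.List.pyRange (-15) 15 1).foldl
          (fun (s : Bool × Bool × Option (Int × Int)) j =>
            let xok := if x == c.1 + j then true else s.1
            let yok := if y == c.2 + j then true else s.2.1
            (xok, yok, if xok && yok then some c else s.2.2)) (false, false, v)).2.2) none
      = pvCOORD.reverse.find? (pvHit x y) := by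
    have : pvCOORD.foldl
        (fun (v : Option (Int × Int)) (c : Int × Int) =>
          ((PySem.List.pyRange (-15) 15 1).foldl
            (fun (s : Bool × Bool × Option (Int × Int)) j =>
              let xok := if x == c.1 + j then true else s.1
              let yok := if y == c.2 + j then true else s.2.1
              (xok, yok, if xok && yok then some c else s.2.2)) (false, false, v)).2.2) none
        = pvCOORD.foldl (fun (v : Option (Int × Int)) c => if pvHit x y c then some c else v) none := by
      apply PySem.List.foldl_congr_mem
      intro v c _
      exact hstep v c
    rw [this, pv_lastmatch]
    cases pvCOORD.reverse.find? (pvHit x y) <;> simp [Option.or]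
  rw [hfold, pv_occup, pv_snap_eq]
  cases hy : pvYVals.find? (fun v => pvYHit y v) with
  | none => rfl
  | some cy =>
    simp only
    cases hcond : ((decide (-15 ≤ x - (100 * PySem.Int.floordiv (x + 15) 100))
          && decide (x - (100 * PySem.Int.floordiv (x + 15) 100) ≤ 14))
        && pvCOORD.contains (100 * PySem.Int.floordiv (x + 15) 100, cy)) with
    | false => simp
    | true => simp

-- ===== VERDICT (by name: the statement is the Claim_ definition above) =====
theorem verifier_coord_spec : Claim_equal_verifier_coord := by
  intro sp lo lj _ _
  unfold Spec_verifier_coord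
  exact verifier_coord_eq sp lo lj
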